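-- pv_equiv track=rewrite | github.com/wkdwlgus/python_algorithm | 17413.py | reverse_words_with_tags
-- ===== SOURCE A (Python) =====
-- def reverse_words_with_tags(s):
--     result = [] #변경된 문자열을 담는 리스트
--     i = 0
--     while len(s) > i:
--         if s[i] != '<': # 단어 일때
--             j = i
--             while len(s) > j and s[j] != '<':
--                 j += 1  # 태그 전까지의 단어 인덱스 체크
--
--             words = s[i: j].split(' ')
--             reversed_words = [word[::-1] for word in words]
--             result.append(' '.join(reversed_words))
--
--             i = j
--
--         else: # 태그 일때
--             j = i
--             while j < len(s) and s[j] != '>':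
--                 j += 1
--             result.append(s[i: j + 1])
--             i = j + 1
--     return ''.join(result)
-- ===== SOURCE B (Python) =====
-- def reverse_words_with_tags(s):
--     # single left-to-right pass: a 2-state machine (in tag / in text) with a word buffer
--     out = []
--     buf = []
--     in_tag = False
--     for c in s:
--         if in_tag:
--             out.append(c)
--             if c == '>':
--                 in_tag = False
--         elif c == '<':
--             out.extend(reversed(buf))
--             buf = []
--             out.append(c)
--             in_tag = True
--         elif c == ' ':
--             out.extend(reversed(buf))
--             buf = []
--             out.append(c)
--         else:
--             buf.append(c)
--     out.extend(reversed(buf))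
--     return ''.join(out)
-- ===== Notes on version B (the rewrite author's own statement) =====
-- stated objective: alternative
-- what changed: A scans runs with nested index loops, slices, split-on-space and per-word reversal; B is a single character-at-a-time pass driven by a two-state machine (in-tag vs in-text) with a word buffer that is flushed reversed at word boundaries.
import Mathlib
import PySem

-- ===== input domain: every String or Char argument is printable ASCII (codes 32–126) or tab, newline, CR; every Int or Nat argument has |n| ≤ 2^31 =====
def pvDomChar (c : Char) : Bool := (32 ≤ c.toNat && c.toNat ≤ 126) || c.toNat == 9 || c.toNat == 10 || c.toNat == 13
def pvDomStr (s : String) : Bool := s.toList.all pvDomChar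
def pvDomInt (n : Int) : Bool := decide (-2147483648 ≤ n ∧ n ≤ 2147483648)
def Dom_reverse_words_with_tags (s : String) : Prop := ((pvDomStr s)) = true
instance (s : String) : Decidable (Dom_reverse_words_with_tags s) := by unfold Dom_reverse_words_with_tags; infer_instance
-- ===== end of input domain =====

-- B replaces A's run-based nested scans (slice, split(' '), per-word reverse, join) by a
-- single-pass 2-state machine with a word buffer; alternative decomposition, same cost.

-- ===== PORT A =====
-- inner 'while' loops of A: count characters before the first occurrence of `stop`
def scanUntil (stop : Char) : List Char → Nat
  | [] => 0
  | c :: r => if c = stop then 0 else scanUntil stop r + 1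

-- Python's str.split(' ') on a char list (splits on every single space, keeps empties)
def pySplitSpace : List Char → List (List Char)
  | [] => [[]]
  | c :: r =>
    if c = ' ' then [] :: pySplitSpace r
    else
      match pySplitSpace r with
      | w :: ws => (c :: w) :: ws
      | [] => [[c]]

-- Python's ' '.join on char lists
def pyJoinSpace : List (List Char) → List Char
  | [] => []
  | [w] => w
  | w :: ws => w ++ ' ' :: pyJoinSpace ws

-- outer 'while' of A: one iteration per word-run or tag, building the result list
def aGo : List Char → List (List Char)
  | [] => []
  | c :: r =>
    if c ≠ '<' then
      let j := scanUntil '<' (c :: r)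
      pyJoinSpace ((pySplitSpace ((c :: r).take j)).map List.reverse) :: aGo ((c :: r).drop j)
    else
      let j := scanUntil '>' (c :: r)
      ((c :: r).take (j + 1)) :: aGo ((c :: r).drop (j + 1))
termination_by t => t.length
decreasing_by
  · have hj : scanUntil '<' (c :: r) = scanUntil '<' r + 1 := by
      simp [scanUntil, *]
    simp [hj, List.length_drop]
  · simp [List.length_drop]

def reverse_words_with_tags (s : String) : String :=
  String.mk (aGo s.toList).flatten

-- ===== PORT B =====
-- one step of B's state machine; state = (out, buf, in_tag)
def bStep (st : List Char × List Char × Bool) (c : Char) : List Char × List Char × Bool :=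
  match st with
  | (out, buf, inTag) =>
    if inTag then (out ++ [c], buf, c != '>')
    else if c = '<' then (out ++ buf.reverse ++ [c], [], true)
    else if c = ' ' then (out ++ buf.reverse ++ [c], [], false)
    else (out, buf ++ [c], false)

def reverse_words_with_tags_alt (s : String) : String :=
  let st := s.toList.foldl bStep ([], [], false)
  String.mk (st.1 ++ st.2.1.reverse)

-- ===== PRECONDITION & SPEC =====
def Spec_reverse_words_with_tags (s : String) (out : String) : Prop := out = reverse_words_with_tags_alt s
instance (s : String) (out : String) : Decidable (Spec_reverse_words_with_tags s out) := by unfold Spec_reverse_words_with_tags; infer_instance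

-- ===== CLAIM (what is proved, stated in full; the proofs are below) =====
def Claim_equal_reverse_words_with_tags : Prop := ∀ (s : String), Dom_reverse_words_with_tags s → Spec_reverse_words_with_tags s (reverse_words_with_tags s)

-- ===== LEMMAS AND PROOFS =====

-- emission of B's machine from state (buf, g), including the final flush of buf
def Fc (t : List Char) (buf : List Char) (g : Bool) : List Char :=
  let st := t.foldl bStep ([], buf, g)
  st.1 ++ st.2.1.reverse

theorem bStep_out (out buf : List Char) (g : Bool) (c : Char) :
    bStep (out, buf, g) c = (out ++ (bStep ([], buf, g) c).1, (bStep ([], buf, g) c).2) := by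
  simp only [bStep]
  split_ifs <;> simp

theorem foldl_out (t : List Char) : ∀ (out buf : List Char) (g : Bool),
    t.foldl bStep (out, buf, g)
      = (out ++ (t.foldl bStep ([], buf, g)).1, (t.foldl bStep ([], buf, g)).2) := by
  induction t with
  | nil => intro out buf g; simp
  | cons c t ih =>
    intro out buf g
    rcases h : bStep ([], buf, g) c with ⟨d, b, g'⟩
    simp only [List.foldl_cons, bStep_out out buf g c, h]
    rw [ih (out ++ d) b g', ih d b g']
    simp

theorem Fc_nil (buf : List Char) (g : Bool) : Fc [] buf g = buf.reverse := by
  simp [Fc]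

theorem Fc_cons_true (c : Char) (t buf : List Char) :
    Fc (c :: t) buf true = c :: Fc t buf (c != '>') := by
  simp only [Fc, List.foldl_cons, bStep, if_true]
  rw [foldl_out]
  simp

theorem Fc_cons_lt (t buf : List Char) :
    Fc ('<' :: t) buf false = buf.reverse ++ '<' :: Fc t [] true := by
  simp only [Fc, List.foldl_cons, bStep, if_false, if_pos rfl]
  rw [foldl_out]
  simp

theorem Fc_cons_sp (t buf : List Char) :
    Fc (' ' :: t) buf false = buf.reverse ++ ' ' :: Fc t [] false := by
  have h : (' ' : Char) ≠ '<' := by decide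
  simp only [Fc, List.foldl_cons, bStep, if_false, if_neg h, if_pos rfl]
  rw [foldl_out]
  simp

theorem Fc_cons_char (c : Char) (t buf : List Char) (h1 : c ≠ '<') (h2 : c ≠ ' ') :
    Fc (c :: t) buf false = Fc t (buf ++ [c]) false := by
  simp only [Fc, List.foldl_cons, bStep, if_neg h1, if_neg h2]
  simp

theorem scanUntil_le (x : Char) (t : List Char) : scanUntil x t ≤ t.length := by
  induction t with
  | nil => simp [scanUntil]
  | cons c r ih =>
    simp only [scanUntil, List.length_cons]
    split_ifs <;> omega

theorem scanUntil_take (x : Char) (t : List Char) : x ∉ t.take (scanUntil x t) := by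
  induction t with
  | nil => simp [scanUntil]
  | cons c r ih =>
    simp only [scanUntil]
    split_ifs with h
    · simp
    · simp only [List.take_succ_cons, List.mem_cons]
      rintro (rfl | hm)
      · exact h rfl
      · exact ih hm

theorem scanUntil_drop (x : Char) (t : List Char) :
    t.drop (scanUntil x t) = [] ∨ ∃ u, t.drop (scanUntil x t) = x :: u := by
  induction t with
  | nil => left; simp
  | cons c r ih =>
    simp only [scanUntil]
    split_ifs with h
    · right; exact ⟨r, by simp [h]⟩
    · simpa using ih

-- joined reversed words of a run
def J (r : List Char) : List Char := pyJoinSpace ((pySplitSpace r).map List.reverse)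

theorem pySplitSpace_ne_nil (r : List Char) : pySplitSpace r ≠ [] := by
  cases r with
  | nil => simp [pySplitSpace]
  | cons c r =>
    simp only [pySplitSpace]
    split_ifs
    · simp
    · cases h : pySplitSpace r <;> simp

theorem pySplitSpace_nospace (r : List Char) (h : ' ' ∉ r) : pySplitSpace r = [r] := by
  induction r with
  | nil => simp [pySplitSpace]
  | cons c r ih =>
    simp only [List.mem_cons, not_or] at h
    simp only [pySplitSpace, if_neg (Ne.symm h.1), ih h.2]

theorem pySplitSpace_prefix (buf r : List Char) (h : ' ' ∉ buf) :
    pySplitSpace (buf ++ ' ' :: r) = buf :: pySplitSpace r := by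
  induction buf with
  | nil => simp [pySplitSpace]
  | cons c b ih =>
    simp only [List.mem_cons, not_or] at h
    simp only [List.cons_append, pySplitSpace, if_neg (Ne.symm h.1),
      ih h.2]

theorem pyJoinSpace_cons (w : List Char) (ws : List (List Char)) (h : ws ≠ []) :
    pyJoinSpace (w :: ws) = w ++ ' ' :: pyJoinSpace ws := by
  cases ws with
  | nil => exact absurd rfl h
  | cons w' ws' => rfl

theorem J_nospace (buf : List Char) (h : ' ' ∉ buf) : J buf = buf.reverse := by
  simp [J, pySplitSpace_nospace buf h, pyJoinSpace]

theorem J_split (buf r : List Char) (h : ' ' ∉ buf) :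
    J (buf ++ ' ' :: r) = buf.reverse ++ ' ' :: J r := by
  simp only [J, pySplitSpace_prefix buf r h, List.map_cons]
  rw [pyJoinSpace_cons]
  simp [pySplitSpace_ne_nil]

-- word-run lemma: B's machine over a '<'-free run followed by nothing or a tag
theorem word_run (r : List Char) : ∀ (buf rest : List Char),
    '<' ∉ r → ' ' ∉ buf →
    (rest = [] ∨ ∃ u, rest = '<' :: u) →
    Fc (r ++ rest) buf false = J (buf ++ r) ++ Fc rest [] false := by
  induction r with
  | nil =>
    rintro buf rest - hb (rfl | ⟨u, rfl⟩)
    · simp [Fc_nil, J_nospace buf hb]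
    · simp [Fc_cons_lt, J_nospace buf hb]
  | cons c r ih =>
    rintro buf rest hr hb hrest
    simp only [List.mem_cons, not_or] at hr
    by_cases hc : c = ' '
    · subst hc
      rw [List.cons_append, Fc_cons_sp, ih [] rest hr.2 (by simp) hrest,
        J_split buf r hb]
      simp
    · rw [List.cons_append, Fc_cons_char c _ buf (Ne.symm hr.1) hc,
        ih (buf ++ [c]) rest hr.2 (by simp [hb, Ne.symm hc]) hrest]
      simp

-- tag lemma: B's machine in tag mode copies up to and including the first '>'
theorem tag_run (u : List Char) : ∀ (buf : List Char),
    Fc u buf true =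
      if scanUntil '>' u < u.length
      then u.take (scanUntil '>' u + 1) ++ Fc (u.drop (scanUntil '>' u + 1)) buf false
      else u ++ buf.reverse := by
  induction u with
  | nil => intro buf; simp [Fc_nil, scanUntil]
  | cons c u ih =>
    intro buf
    rw [Fc_cons_true]
    by_cases hc : c = '>'
    · subst hc
      simp [scanUntil, Fc]
    · have hb : (c != '>') = true := by simp [hc]
      have hs : scanUntil '>' (c :: u) = scanUntil '>' u + 1 := by
        simp [scanUntil, hc]
      rw [hb, ih buf, hs]
      by_cases hl : scanUntil '>' u < u.length
      · rw [if_pos hl, if_pos (by simp; omega)]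
        simp
      · rw [if_neg hl, if_neg (by simp; omega)]
        simp

theorem aGo_word (c : Char) (r : List Char) (hc : c ≠ '<') :
    aGo (c :: r) =
      pyJoinSpace ((pySplitSpace ((c :: r).take (scanUntil '<' (c :: r)))).map List.reverse)
        :: aGo ((c :: r).drop (scanUntil '<' (c :: r))) := by
  rw [aGo]
  simp [hc]

theorem aGo_tag (r : List Char) :
    aGo ('<' :: r) =
      (('<' :: r).take (scanUntil '>' ('<' :: r) + 1))
        :: aGo (('<' :: r).drop (scanUntil '>' ('<' :: r) + 1)) := by
  rw [aGo]
  simp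

theorem main_eq (n : Nat) : ∀ (t : List Char), t.length ≤ n →
    (aGo t).flatten = Fc t [] false := by
  induction n with
  | zero =>
    intro t ht
    have : t = [] := List.length_eq_zero_iff.mp (Nat.le_zero.mp ht)
    subst this
    simp [aGo, Fc_nil]
  | succ n ih =>
    intro t ht
    cases t with
    | nil => simp [aGo, Fc_nil]
    | cons c r =>
      by_cases hc : c = '<'
      · subst hc
        rw [aGo_tag r]
        have hs : scanUntil '>' ('<' :: r) = scanUntil '>' r + 1 := by
          simp [scanUntil]
        have hlen : (('<' :: r).drop (scanUntil '>' ('<' :: r) + 1)).length ≤ n := by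
          simp only [List.length_drop, List.length_cons] at *
          omega
        rw [List.flatten_cons, ih _ hlen, Fc_cons_lt, tag_run r []]
        by_cases hl : scanUntil '>' r < r.length
        · rw [if_pos hl]
          simp only [hs, List.take_succ_cons, List.drop_succ_cons]
          simp
        · rw [if_neg hl]
          have hr : scanUntil '>' r = r.length := by
            have := scanUntil_le '>' r
            omega
          simp only [hs, List.take_succ_cons, List.drop_succ_cons, hr]
          simp [List.take_of_length_le, List.drop_of_length_le, aGo, Fc_nil]
      · rw [aGo_word c r hc]
        have hs : scanUntil '<' (c :: r) = scanUntil '<' r + 1 := by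
          simp [scanUntil, hc]
        have hlen : ((c :: r).drop (scanUntil '<' (c :: r))).length ≤ n := by
          simp only [List.length_drop, List.length_cons] at *
          omega
        rw [List.flatten_cons, ih _ hlen]
        have hsplit := List.take_append_drop (scanUntil '<' (c :: r)) (c :: r)
        symm
        calc Fc (c :: r) [] false
            = Fc ((c :: r).take (scanUntil '<' (c :: r))
                ++ (c :: r).drop (scanUntil '<' (c :: r))) [] false := by rw [hsplit]
          _ = J ([] ++ (c :: r).take (scanUntil '<' (c :: r)))
                ++ Fc ((c :: r).drop (scanUntil '<' (c :: r))) [] false := by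
              exact word_run _ _ _ (scanUntil_take '<' (c :: r)) (by simp)
                (scanUntil_drop '<' (c :: r))
          _ = _ := by simp [J]

-- ===== VERDICT (by name: the statement is the Claim_ definition above) =====

theorem reverse_words_with_tags_spec : Claim_equal_reverse_words_with_tags := by
  intro s _
  unfold Spec_reverse_words_with_tags reverse_words_with_tags reverse_words_with_tags_alt
  rw [main_eq s.toList.length s.toList le_rfl]
  rfl
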